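-- pv_equiv track=rewrite | github.com/k-harada/AtCoder | ABC/ABC188/C.py | solve
-- ===== SOURCE A (Python) =====
-- def solve(n, a_list):
--
--     # find max in left
--     max_i0 = -1
--     max_a0 = 0
--     for i in range(2 ** (n - 1)):
--         a = a_list[i]
--         if a > max_a0:
--             max_a0 = a
--             max_i0 = i + 1
--
--     # find max in right
--     max_i1 = -1
--     max_a1 = 0
--     for i in range(2 ** (n - 1), 2 ** n):
--         a = a_list[i]
--         if a > max_a1:
--             max_a1 = a
--             max_i1 = i + 1
--     if max_a1 > max_a0:
--         return max_i0
--     else: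
--         return max_i1
-- ===== SOURCE B (Python) =====
-- def solve(n, a_list):
--     # Find the global champion first, then scan only the half that does
--     # not contain it: the runner-up is that half's champion.
--     half = 2 ** (n - 1)
--     best_i = -1
--     best_a = 0
--     for i in range(2 ** n):
--         a = a_list[i]
--         if a > best_a:
--             best_a = a
--             best_i = i + 1
--     if best_i <= half:
--         lo, hi = half, 2 ** n
--     else:
--         lo, hi = 0, half
--     res_i = -1
--     res_a = 0
--     for i in range(lo, hi):
--         a = a_list[i]
--         if a > res_a:
--             res_a = a
--             res_i = i + 1
--     return res_i
-- ===== Notes on version B (the rewrite author's own statement) =====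
-- stated objective: alternative
-- what changed: B finds the global champion with one full-array scan and then scans only the half not containing it for the runner-up, instead of A's two independent half scans whose maxima are compared at the end.
import Mathlib
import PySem

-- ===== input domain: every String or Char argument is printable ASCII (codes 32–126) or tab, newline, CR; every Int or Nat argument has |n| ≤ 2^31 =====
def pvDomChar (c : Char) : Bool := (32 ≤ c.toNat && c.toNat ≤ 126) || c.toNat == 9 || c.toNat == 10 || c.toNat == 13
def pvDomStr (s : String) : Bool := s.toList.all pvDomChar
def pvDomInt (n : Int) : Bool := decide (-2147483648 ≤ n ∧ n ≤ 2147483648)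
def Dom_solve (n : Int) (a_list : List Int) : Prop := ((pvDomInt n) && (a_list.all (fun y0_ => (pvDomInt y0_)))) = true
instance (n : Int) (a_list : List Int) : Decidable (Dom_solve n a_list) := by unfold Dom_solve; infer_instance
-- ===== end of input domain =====

-- B replaces A's two independent half scans by one global scan followed by a scan
-- of the half not containing the global champion (alternative decomposition).

-- ===== PORT A =====
-- the shared loop body 'a = a_list[i]; if a > max_a: max_a, max_i = a, i+1'
-- (textually identical in A's two loops and in B's two loops)
def pvStep (a_list : List Int) (s : Int × Int) (i : Int) : Int × Int :=
  let a := PySem.List.pyGetD a_list i 0   -- a_list[i]; in range under Pre_solve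
  if a > s.2 then (i + 1, a) else s

def solve (n : Int) (a_list : List Int) : Int :=
  let s0 := (PySem.List.pyRange 0 ((2:Int) ^ (n-1).toNat) 1).foldl (pvStep a_list) (-1, 0)
  let s1 := (PySem.List.pyRange ((2:Int) ^ (n-1).toNat) ((2:Int) ^ n.toNat) 1).foldl (pvStep a_list) (-1, 0)
  if s1.2 > s0.2 then s0.1 else s1.1

-- ===== PORT B =====
def solve_alt (n : Int) (a_list : List Int) : Int :=
  let half : Int := (2:Int) ^ (n-1).toNat
  let g := (PySem.List.pyRange 0 ((2:Int) ^ n.toNat) 1).foldl (pvStep a_list) (-1, 0)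
  let lh : Int × Int := if g.1 ≤ half then (half, (2:Int) ^ n.toNat) else (0, half)
  ((PySem.List.pyRange lh.1 lh.2 1).foldl (pvStep a_list) (-1, 0)).1

-- ===== PRECONDITION & SPEC =====
-- Pre_solve holds exactly when Python A returns: n ≥ 1 (for n ≤ 0, 2**(n-1) is a float and
-- range raises TypeError) and the list has at least 2**n elements (else IndexError);
-- 'n.toNat ≤ Nat.log2 a_list.length' is equivalent to '2^n ≤ a_list.length' here.
def Pre_solve (n : Int) (a_list : List Int) : Prop :=
  1 ≤ n ∧ n.toNat ≤ Nat.log2 a_list.length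
instance (n : Int) (a_list : List Int) : Decidable (Pre_solve n a_list) := by
  unfold Pre_solve; infer_instance
def pvWitness_solve : Int × List Int := (2, [1, 3, 2, 4])

def Spec_solve (n : Int) (a_list : List Int) (out : Int) : Prop := out = solve_alt n a_list
instance (n : Int) (a_list : List Int) (out : Int) : Decidable (Spec_solve n a_list out) := by unfold Spec_solve; infer_instance

-- ===== CLAIM (what is proved, stated in full; the proofs are below) =====
def Claim_equal_solve : Prop := ∀ (n : Int) (a_list : List Int), Dom_solve n a_list → Pre_solve n a_list → Spec_solve n a_list (solve n a_list)

-- ===== LEMMAS AND PROOFS =====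

-- the running maximum never drops below a nonnegative start
theorem pvFold_snd_nonneg (al : List Int) (l : List Int) :
    ∀ s : Int × Int, 0 ≤ s.2 → 0 ≤ (l.foldl (pvStep al) s).2 := by
  induction l with
  | nil => intro s h; simpa using h
  | cons x l ih =>
    intro s h
    simp only [List.foldl_cons]
    by_cases hx : PySem.List.pyGetD al x 0 > s.2
    · exact ih _ (by simp [pvStep, hx]; omega)
    · exact ih _ (by simp [pvStep, hx]; exact h)

-- a scan either leaves its state unchanged or records some index of the list, +1
theorem pvFold_fst (al : List Int) (l : List Int) :
    ∀ s : Int × Int, l.foldl (pvStep al) s = s ∨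
      ∃ x ∈ l, (l.foldl (pvStep al) s).1 = x + 1 := by
  induction l with
  | nil => intro s; exact Or.inl rfl
  | cons x l ih =>
    intro s
    simp only [List.foldl_cons]
    by_cases hx : PySem.List.pyGetD al x 0 > s.2
    · have hstep : pvStep al s x = (x + 1, PySem.List.pyGetD al x 0) := by
        simp [pvStep, hx]
      rw [hstep]
      rcases ih (x + 1, PySem.List.pyGetD al x 0) with h | ⟨y, hy, hyy⟩
      · exact Or.inr ⟨x, by simp, by rw [h]⟩
      · exact Or.inr ⟨y, by simp [hy], hyy⟩
    · have hstep : pvStep al s x = s := by simp [pvStep, hx]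
      rw [hstep]
      rcases ih s with h | ⟨y, hy, hyy⟩
      · exact Or.inl h
      · exact Or.inr ⟨y, by simp [hy], hyy⟩

-- key lemma: a scan from an arbitrary nonnegative start is determined by the
-- scan from the initial state (-1, 0)
theorem pvFold_init (al : List Int) (l : List Int) :
    ∀ (i v : Int), 0 ≤ v →
      l.foldl (pvStep al) (i, v) =
        (if (l.foldl (pvStep al) (-1, 0)).2 > v
          then l.foldl (pvStep al) (-1, 0) else (i, v)) := by
  induction l with
  | nil => intro i v hv; simp; omega
  | cons x l ih =>
    intro i v hv
    simp only [List.foldl_cons]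
    by_cases hx : PySem.List.pyGetD al x 0 > v
    · have h0 : PySem.List.pyGetD al x 0 > (0:Int) := by omega
      have hs1 : pvStep al (i, v) x = (x + 1, PySem.List.pyGetD al x 0) := by
        simp [pvStep, hx]
      have hs2 : pvStep al (-1, 0) x = (x + 1, PySem.List.pyGetD al x 0) := by
        simp [pvStep, h0]
      rw [hs1, hs2]
      have hrec := ih (x + 1) (PySem.List.pyGetD al x 0) (by omega)
      rw [hrec]
      clear ih hrec
      split_ifs with h1 <;> simp_all <;> omega
    · have hs1 : pvStep al (i, v) x = (i, v) := by simp [pvStep, hx]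
      rw [hs1]
      rw [ih i v hv]
      by_cases h0 : PySem.List.pyGetD al x 0 > (0:Int)
      · have hs2 : pvStep al (-1, 0) x = (x + 1, PySem.List.pyGetD al x 0) := by
          simp [pvStep, h0]
        rw [hs2, ih (x + 1) (PySem.List.pyGetD al x 0) (by omega)]
        clear ih
        split_ifs with h1 h2 h3 <;> simp_all <;> omega
      · have hs2 : pvStep al (-1, 0) x = (-1, 0) := by simp [pvStep, h0]
        rw [hs2]

-- ===== VERDICT (by name: the statement is the Claim_ definition above) =====
theorem solve_spec : Claim_equal_solve := by
  intro n a_list _ _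
  unfold Spec_solve solve solve_alt
  set half : Int := (2:Int) ^ (n-1).toNat with hhalf
  set full : Int := (2:Int) ^ n.toNat with hfull
  have h0half : (0:Int) ≤ half := by positivity
  have hhf : half ≤ full := by
    apply pow_le_pow_right₀ (by norm_num)
    omega
  -- split the global range at half
  have hsplit := PySem.List.pyRange_one_append 0 half full h0half hhf
  set L := PySem.List.pyRange 0 half 1 with hL
  set R := PySem.List.pyRange half full 1 with hR
  set sL := L.foldl (pvStep a_list) (-1, 0) with hsL
  set sR := R.foldl (pvStep a_list) (-1, 0) with hsR
  have hLnn : 0 ≤ sL.2 := pvFold_snd_nonneg a_list L (-1, 0) (by norm_num)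
  have hg : (PySem.List.pyRange 0 full 1).foldl (pvStep a_list) (-1, 0) =
      (if sR.2 > sL.2 then sR else sL) := by
    rw [hsplit, List.foldl_append]
    have : L.foldl (pvStep a_list) (-1, 0) = (sL.1, sL.2) := by simp [hsL]
    rw [this, pvFold_init a_list R sL.1 sL.2 hLnn, ← hsR]
  simp only [hg]
  by_cases hcmp : sR.2 > sL.2
  · -- global champion is in the right half: B scans the left half, as does A's return
    simp only [if_pos hcmp]
    have hRne : ¬ sR.1 ≤ half := by
      rcases pvFold_fst a_list R (-1, 0) with h | ⟨x, hx, hxx⟩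
      · rw [← hsR] at h; rw [h] at hcmp; omega
      · rw [← hsR] at hxx
        have := (PySem.List.mem_pyRange_one).1 (hR ▸ hx)
        omega
    simp only [if_neg hRne]
    exact congrArg Prod.fst hsL
  · -- right maximum does not beat the left one: B scans the right half, as does A
    simp only [if_neg hcmp]
    have hLle : sL.1 ≤ half := by
      rcases pvFold_fst a_list L (-1, 0) with h | ⟨x, hx, hxx⟩
      · rw [← hsL] at h; rw [h]; omega
      · rw [← hsL] at hxx
        have := (PySem.List.mem_pyRange_one).1 (hL ▸ hx)
        omega
    simp only [if_pos hLle]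
    exact congrArg Prod.fst hsR
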